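-- pv_equiv track=rewrite | github.com/BioDAC/dask-workflow | dask-new-overlap.py | check_existing_chunks
-- ===== SOURCE A (Python) =====
-- import collections
-- import itertools
--
-- TZYX = collections.namedtuple("TZYX", ["T", "Z", "Y", "X"])
--
-- def check_existing_chunks(da_chunk: TZYX, chunk_ratios, existing_chunks):
--     """
--     Check to see if all necessary chunks are present in existing_chunks
--     (a set of tuples of TZYX).  It checks all zarr chunks that contribute
--     to a dask chunk.  It stops early and uses a set for checking.
--
--     The chunk ratios must be integral.
--
--     da_chunk: TZYX is the dask chunk
--     chunk_ratios: TZYX dask_chunk_size / zarr_chunk size for each axis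
--     existing_chunks: set(TZYX) set of existing chunks
--     """
--     ranges = []
--     for da_ch, ch_r in zip(da_chunk, chunk_ratios):
--         ranges.append(range(da_ch * ch_r, (da_ch+1) * ch_r))
--     return all(
--         map(
--             lambda t: t in existing_chunks,
--             itertools.product(*ranges)
--         )
--     )
-- ===== SOURCE B (Python) =====
-- def check_existing_chunks(da_chunk, chunk_ratios, existing_chunks):
--     """Count-based check: one pass over existing_chunks instead of
--     enumerating the whole product of required chunks."""
--     bounds = [(d * r, (d + 1) * r) for d, r in zip(da_chunk, chunk_ratios)]
--     needed = 1
--     for lo, hi in bounds: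
--         needed *= max(0, hi - lo)
--     if needed == 0:
--         return True
--     found = {t for t in existing_chunks
--              if all(lo <= x < hi for (lo, hi), x in zip(bounds, t))}
--     return len(found) == needed
-- ===== Notes on version B (the rewrite author's own statement) =====
-- stated objective: faster
-- what changed: Instead of enumerating the full Cartesian product of required zarr chunks and testing each for membership, B computes the required count arithmetically and makes one pass over existing_chunks, counting the distinct tuples that fall inside the required box and comparing that count to the product of the range lengths.
import Mathlib
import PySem

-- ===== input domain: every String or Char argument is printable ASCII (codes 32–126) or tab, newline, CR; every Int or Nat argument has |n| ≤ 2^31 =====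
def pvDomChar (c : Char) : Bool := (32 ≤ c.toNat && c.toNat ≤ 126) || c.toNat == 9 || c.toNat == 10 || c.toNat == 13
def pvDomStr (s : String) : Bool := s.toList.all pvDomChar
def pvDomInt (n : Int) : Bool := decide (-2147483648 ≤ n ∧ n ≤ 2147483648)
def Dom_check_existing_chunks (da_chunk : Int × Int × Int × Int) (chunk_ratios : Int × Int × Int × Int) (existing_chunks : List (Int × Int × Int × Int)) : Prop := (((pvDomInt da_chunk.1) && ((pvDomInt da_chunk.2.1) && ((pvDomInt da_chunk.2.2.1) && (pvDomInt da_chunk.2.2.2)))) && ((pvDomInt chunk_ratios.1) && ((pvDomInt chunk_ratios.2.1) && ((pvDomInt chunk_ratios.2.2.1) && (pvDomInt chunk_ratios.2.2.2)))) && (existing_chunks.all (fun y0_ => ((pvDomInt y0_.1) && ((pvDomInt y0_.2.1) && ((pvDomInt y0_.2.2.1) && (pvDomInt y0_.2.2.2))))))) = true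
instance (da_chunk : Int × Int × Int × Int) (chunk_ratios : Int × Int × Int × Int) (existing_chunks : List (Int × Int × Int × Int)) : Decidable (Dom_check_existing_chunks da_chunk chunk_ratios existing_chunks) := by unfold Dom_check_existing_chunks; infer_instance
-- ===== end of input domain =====

-- B replaces the product-enumeration membership scan by a counting pass over
-- existing_chunks (objective: faster when the per-axis chunk ratios are large).

-- ===== PORT A =====
-- A builds range(da_ch*ch_r, (da_ch+1)*ch_r) for each of the four fixed axes
-- (the zip over the two 4-tuples is unrolled), forms itertools.product of the
-- four ranges, and checks membership of every tuple in existing_chunks.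
def check_existing_chunks (da_chunk : Int × Int × Int × Int) (chunk_ratios : Int × Int × Int × Int) (existing_chunks : List (Int × Int × Int × Int)) : Bool :=
  let r0 := PySem.List.pyRange (da_chunk.1 * chunk_ratios.1) ((da_chunk.1 + 1) * chunk_ratios.1) 1
  let r1 := PySem.List.pyRange (da_chunk.2.1 * chunk_ratios.2.1) ((da_chunk.2.1 + 1) * chunk_ratios.2.1) 1
  let r2 := PySem.List.pyRange (da_chunk.2.2.1 * chunk_ratios.2.2.1) ((da_chunk.2.2.1 + 1) * chunk_ratios.2.2.1) 1
  let r3 := PySem.List.pyRange (da_chunk.2.2.2 * chunk_ratios.2.2.2) ((da_chunk.2.2.2 + 1) * chunk_ratios.2.2.2) 1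
  -- itertools.product(*ranges) in lexicographic order, then all(t in existing_chunks)
  (r0.flatMap (fun t => r1.flatMap (fun z => r2.flatMap (fun y => r3.map (fun x => (t, z, y, x)))))).all
    (fun p => existing_chunks.contains p)

-- ===== PORT B =====
-- B computes the four [lo, hi) bounds, the required count as a product of
-- range lengths, and counts the distinct existing chunks inside the box.
def check_existing_chunks_alt (da_chunk : Int × Int × Int × Int) (chunk_ratios : Int × Int × Int × Int) (existing_chunks : List (Int × Int × Int × Int)) : Bool :=
  let b0 : Int × Int := (da_chunk.1 * chunk_ratios.1, (da_chunk.1 + 1) * chunk_ratios.1)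
  let b1 : Int × Int := (da_chunk.2.1 * chunk_ratios.2.1, (da_chunk.2.1 + 1) * chunk_ratios.2.1)
  let b2 : Int × Int := (da_chunk.2.2.1 * chunk_ratios.2.2.1, (da_chunk.2.2.1 + 1) * chunk_ratios.2.2.1)
  let b3 : Int × Int := (da_chunk.2.2.2 * chunk_ratios.2.2.2, (da_chunk.2.2.2 + 1) * chunk_ratios.2.2.2)
  let needed : Int := max 0 (b0.2 - b0.1) * max 0 (b1.2 - b1.1) * max 0 (b2.2 - b2.1) * max 0 (b3.2 - b3.1)
  if needed == 0 then true
  else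
    let found : PySem.Set (Int × Int × Int × Int) :=
      PySem.Set.ofList (existing_chunks.filter (fun t =>
        (b0.1 ≤ t.1 && t.1 < b0.2) && (b1.1 ≤ t.2.1 && t.2.1 < b1.2) &&
        (b2.1 ≤ t.2.2.1 && t.2.2.1 < b2.2) && (b3.1 ≤ t.2.2.2 && t.2.2.2 < b3.2)))
    (PySem.Set.len found : Int) == needed

-- ===== PRECONDITION & SPEC =====
def Spec_check_existing_chunks (da_chunk : Int × Int × Int × Int) (chunk_ratios : Int × Int × Int × Int) (existing_chunks : List (Int × Int × Int × Int)) (out : Bool) : Prop := out = check_existing_chunks_alt da_chunk chunk_ratios existing_chunks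
instance (da_chunk : Int × Int × Int × Int) (chunk_ratios : Int × Int × Int × Int) (existing_chunks : List (Int × Int × Int × Int)) (out : Bool) : Decidable (Spec_check_existing_chunks da_chunk chunk_ratios existing_chunks out) := by unfold Spec_check_existing_chunks; infer_instance

-- ===== CLAIM (what is proved, stated in full; the proofs are below) =====
def Claim_equal_check_existing_chunks : Prop := ∀ (da_chunk : Int × Int × Int × Int) (chunk_ratios : Int × Int × Int × Int) (existing_chunks : List (Int × Int × Int × Int)), Dom_check_existing_chunks da_chunk chunk_ratios existing_chunks → Spec_check_existing_chunks da_chunk chunk_ratios existing_chunks (check_existing_chunks da_chunk chunk_ratios existing_chunks)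

-- ===== LEMMAS AND PROOFS =====

-- Core fact: "every tuple of the 4-D integer box is a member of ex" equals
-- "the box volume is 0, or the number of distinct elements of ex inside the box equals the volume".
theorem pv_box_count_eq_all_mem (l0 h0 l1 h1 l2 h2 l3 h3 : Int) (ex : List (Int × Int × Int × Int)) :
    ((PySem.List.pyRange l0 h0 1).flatMap (fun t => (PySem.List.pyRange l1 h1 1).flatMap (fun z =>
      (PySem.List.pyRange l2 h2 1).flatMap (fun y => (PySem.List.pyRange l3 h3 1).map (fun x => (t, z, y, x)))))).all
      (fun p => ex.contains p)
    = (if (max 0 (h0 - l0) * max 0 (h1 - l1) * max 0 (h2 - l2) * max 0 (h3 - l3) : Int) == 0 then true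
       else ((PySem.Set.ofList (ex.filter (fun t =>
          (l0 ≤ t.1 && t.1 < h0) && (l1 ≤ t.2.1 && t.2.1 < h1) &&
          (l2 ≤ t.2.2.1 && t.2.2.1 < h2) && (l3 ≤ t.2.2.2 && t.2.2.2 < h3))) : List (Int × Int × Int × Int)).length : Int)
          == (max 0 (h0 - l0) * max 0 (h1 - l1) * max 0 (h2 - l2) * max 0 (h3 - l3) : Int)) := by
  set box : Finset (Int × Int × Int × Int) :=
    (Finset.Ico l0 h0) ×ˢ ((Finset.Ico l1 h1) ×ˢ ((Finset.Ico l2 h2) ×ˢ (Finset.Ico l3 h3))) with hbox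
  have hmem : ∀ p : Int × Int × Int × Int, p ∈ box ↔
      ((l0 ≤ p.1 ∧ p.1 < h0) ∧ (l1 ≤ p.2.1 ∧ p.2.1 < h1) ∧ (l2 ≤ p.2.2.1 ∧ p.2.2.1 < h2) ∧ (l3 ≤ p.2.2.2 ∧ p.2.2.2 < h3)) := by
    intro p; simp [hbox, Finset.mem_product, Finset.mem_Ico, and_assoc]
  have hneeded : (max 0 (h0 - l0) * max 0 (h1 - l1) * max 0 (h2 - l2) * max 0 (h3 - l3) : Int) = (box.card : Int) := by
    simp only [hbox, Finset.card_product, Int.card_Ico]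
    push_cast
    rw [Int.toNat_eq_max, Int.toNat_eq_max, Int.toNat_eq_max, Int.toNat_eq_max]
    simp [max_comm]
    ring
  have hA : (((PySem.List.pyRange l0 h0 1).flatMap (fun t => (PySem.List.pyRange l1 h1 1).flatMap (fun z =>
      (PySem.List.pyRange l2 h2 1).flatMap (fun y => (PySem.List.pyRange l3 h3 1).map (fun x => (t, z, y, x)))))).all
      (fun p => ex.contains p) = true) ↔ ∀ p ∈ box, p ∈ ex := by
    simp only [List.all_eq_true, List.mem_flatMap, List.mem_map, PySem.List.mem_pyRange_one,
      List.contains_iff_mem]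
    constructor
    · intro h p hp
      obtain ⟨⟨hp0, hp0'⟩, ⟨hp1, hp1'⟩, ⟨hp2, hp2'⟩, ⟨hp3, hp3'⟩⟩ := (hmem p).mp hp
      exact h p ⟨p.1, ⟨hp0, hp0'⟩, p.2.1, ⟨hp1, hp1'⟩, p.2.2.1, ⟨hp2, hp2'⟩, p.2.2.2, ⟨hp3, hp3'⟩, rfl⟩
    · rintro h p ⟨t, ht, z, hz, y, hy, hx⟩
      obtain ⟨x, hx', rfl⟩ := hx
      exact h _ ((hmem _).mpr ⟨ht, hz, hy, hx'⟩)
  have hlen : ((PySem.Set.ofList (ex.filter (fun t =>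
          (l0 ≤ t.1 && t.1 < h0) && (l1 ≤ t.2.1 && t.2.1 < h1) &&
          (l2 ≤ t.2.2.1 && t.2.2.1 < h2) && (l3 ≤ t.2.2.2 && t.2.2.2 < h3))) : List (Int × Int × Int × Int)).length)
      = (box.filter (fun p => p ∈ ex)).card := by
    rw [← List.toFinset_card_of_nodup (PySem.Set.nodup_ofList _)]
    congr 1
    apply Finset.ext
    intro p
    simp only [List.mem_toFinset, PySem.Set.mem_ofList, List.mem_filter, Finset.mem_filter,
      Bool.and_eq_true, decide_eq_true_eq, hmem p]
    tauto
  rw [Bool.eq_iff_iff, hA]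
  rw [hneeded]
  by_cases hc : box.card = 0
  · have hbe : box = ∅ := Finset.card_eq_zero.mp hc
    simp [hbe]
  · have h0' : ((box.card : Int) == 0) = false := by simp [hc]
    rw [h0']
    simp only [Bool.false_eq_true, if_false, hlen, beq_iff_eq, Nat.cast_inj]
    constructor
    · intro h
      have heq : box.filter (fun p => p ∈ ex) = box := Finset.filter_eq_self.mpr h
      rw [heq]
    · intro h
      have := Finset.eq_of_subset_of_card_le (Finset.filter_subset _ box) (le_of_eq h.symm)
      exact fun p hp => (Finset.filter_eq_self.mp this) p hp

theorem check_existing_chunks_eqv (da_chunk chunk_ratios : Int × Int × Int × Int) (existing_chunks : List (Int × Int × Int × Int)) :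
    check_existing_chunks da_chunk chunk_ratios existing_chunks = check_existing_chunks_alt da_chunk chunk_ratios existing_chunks := by
  simp only [check_existing_chunks, check_existing_chunks_alt, PySem.Set.len]
  exact pv_box_count_eq_all_mem _ _ _ _ _ _ _ _ existing_chunks

-- ===== VERDICT (by name: the statement is the Claim_ definition above) =====
theorem check_existing_chunks_spec : Claim_equal_check_existing_chunks := by
  intro dc cr ex _
  unfold Spec_check_existing_chunks
  exact check_existing_chunks_eqv dc cr ex
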